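-- pv_equiv track=rewrite | github.com/cmudrc/design-research-experiments | src/design_research_experiments/artifacts.py | _union_fieldnames
-- ===== SOURCE A (Python) =====
-- from collections.abc import Mapping, Sequence
-- from typing import Any
--
-- def _union_fieldnames(
--     required_fields: Sequence[str],
--     rows: Sequence[Mapping[str, Any]],
-- ) -> tuple[str, ...]:
--     """Build field names preserving required columns first."""
--     ordered: list[str] = list(required_fields)
--     seen = set(ordered)
--     for row in rows:
--         for key in row:
--             if key in seen:
--                 continue
--             ordered.append(key)
--             seen.add(key)
--     return tuple(ordered)
-- ===== SOURCE B (Python) =====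
-- def _union_fieldnames(required_fields, rows):
--     """Build field names preserving required columns first."""
--     flat = [key for row in rows for key in row]
--     first = {key: i for i, key in reversed(list(enumerate(flat)))}
--     req = set(required_fields)
--     extras = sorted((k for k in first if k not in req), key=first.get)
--     return tuple(required_fields) + tuple(extras)
-- ===== Notes on version B (the rewrite author's own statement) =====
-- stated objective: alternative
-- what changed: Instead of one ordered pass appending unseen keys, B builds a first-occurrence index map by a reverse traversal with dict overwrite and recovers the extras' order by sorting the non-required keys on that index.
import Mathlib
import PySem

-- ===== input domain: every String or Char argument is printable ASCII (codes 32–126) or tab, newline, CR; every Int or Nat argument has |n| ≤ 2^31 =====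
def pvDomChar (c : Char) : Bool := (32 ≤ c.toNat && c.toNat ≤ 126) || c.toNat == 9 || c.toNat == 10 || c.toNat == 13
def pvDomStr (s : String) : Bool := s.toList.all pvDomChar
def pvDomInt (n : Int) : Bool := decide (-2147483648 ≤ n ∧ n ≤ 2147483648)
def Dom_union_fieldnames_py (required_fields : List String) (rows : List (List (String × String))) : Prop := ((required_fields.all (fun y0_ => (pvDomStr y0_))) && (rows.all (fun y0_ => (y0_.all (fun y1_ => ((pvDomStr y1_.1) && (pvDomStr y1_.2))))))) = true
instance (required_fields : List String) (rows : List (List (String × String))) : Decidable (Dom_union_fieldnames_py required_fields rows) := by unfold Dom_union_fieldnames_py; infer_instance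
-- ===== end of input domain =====

-- B builds a first-occurrence index map by a reverse overwrite pass and sorts the
-- non-required keys by that index, instead of A's ordered append-if-unseen pass (alternative).

-- ===== PORT A =====
-- A: ordered = list(required); seen = set(ordered); nested loop appending unseen keys.
def union_fieldnames_py (required_fields : List String) (rows : List (List (String × String))) : List String :=
  let ordered : List String := required_fields
  let seen : PySem.Set String := PySem.Set.ofList ordered
  let st := rows.foldl
    (fun (st : List String × PySem.Set String) row =>
      row.foldl
        (fun (st : List String × PySem.Set String) kv =>
          if PySem.Set.contains st.2 kv.1 then st
          else (st.1 ++ [kv.1], PySem.Set.add st.2 kv.1))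
        st)
    (ordered, seen)
  st.1

-- ===== PORT B =====
-- B: flat = all keys; first = {k: i for i, k in reversed(list(enumerate(flat)))};
--    extras = sorted((k for k in first if k not in set(required)), key=first.get);
--    return tuple(required) + tuple(extras)
def union_fieldnames_py_alt (required_fields : List String) (rows : List (List (String × String))) : List String :=
  let flat : List String := rows.flatMap (fun row => row.map Prod.fst)
  let first : PySem.Dict String Int :=
    (PySem.List.enumerate flat).reverse.foldl
      (fun d p => PySem.Dict.insert d p.2 p.1) PySem.Dict.empty
  let req : PySem.Set String := PySem.Set.ofList required_fields
  let extras : List String :=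
    PySem.List.sorted
      ((PySem.Dict.keys first).filter (fun k => !(PySem.Set.contains req k)))
      (fun k => PySem.Dict.getD first k 0)
  required_fields ++ extras

-- ===== PRECONDITION & SPEC =====
def Spec_union_fieldnames_py (required_fields : List String) (rows : List (List (String × String))) (out : List String) : Prop := out = union_fieldnames_py_alt required_fields rows
instance (required_fields : List String) (rows : List (List (String × String))) (out : List String) : Decidable (Spec_union_fieldnames_py required_fields rows out) := by unfold Spec_union_fieldnames_py; infer_instance

-- ===== CLAIM (what is proved, stated in full; the proofs are below) =====
def Claim_equal_union_fieldnames_py : Prop := ∀ (required_fields : List String) (rows : List (List (String × String))), Dom_union_fieldnames_py required_fields rows → Spec_union_fieldnames_py required_fields rows (union_fieldnames_py required_fields rows)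

-- ===== LEMMAS AND PROOFS =====

-- A's nested fold over rows/pairs is a single fold over the flattened key stream.
theorem pvA_flatten (rows : List (List (String × String)))
    (st : List String × PySem.Set String) :
    rows.foldl
      (fun (st : List String × PySem.Set String) row =>
        row.foldl
          (fun (st : List String × PySem.Set String) kv =>
            if PySem.Set.contains st.2 kv.1 then st
            else (st.1 ++ [kv.1], PySem.Set.add st.2 kv.1))
          st)
      st
    = (rows.flatMap (fun row => row.map Prod.fst)).foldl
        (fun (st : List String × PySem.Set String) k =>
          if PySem.Set.contains st.2 k then st
          else (st.1 ++ [k], PySem.Set.add st.2 k))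
        st := by
  induction rows generalizing st with
  | nil => rfl
  | cons r rs ih =>
      simp only [List.foldl_cons, List.flatMap_cons, List.foldl_append, List.foldl_map]
      exact ih _

-- The key-stream fold with its evolving seen-set is PySem.Set.update on the ordered list,
-- whenever seen and ordered agree on membership.
theorem pvA_fold_eq_update (ks : List String) (acc : List String) (seen : PySem.Set String)
    (h : ∀ x, PySem.Set.contains seen x = acc.contains x) :
    (ks.foldl
      (fun (st : List String × PySem.Set String) k =>
        if PySem.Set.contains st.2 k then st
        else (st.1 ++ [k], PySem.Set.add st.2 k))
      (acc, seen)).1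
    = PySem.Set.update acc ks := by
  induction ks generalizing acc seen with
  | nil => simp [PySem.Set.update]
  | cons k ks ih =>
      simp only [List.foldl_cons, PySem.Set.update_cons]
      by_cases hk : k ∈ acc
      · have hc : PySem.Set.contains seen k = true := by
          rw [h k]; exact List.contains_iff_mem.mpr hk
        rw [hc]
        simp only [if_true]
        have hadd : PySem.Set.add acc k = acc := by
          simp [PySem.Set.add, hk]
        rw [hadd]
        exact ih acc seen h
      · have hc : PySem.Set.contains seen k = false := by
          rw [h k]
          simp [hk]
        rw [hc]
        simp only [Bool.false_eq_true, if_false]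
        have hadd : PySem.Set.add acc k = acc ++ [k] := by
          simp [PySem.Set.add, hk]
        have haddseen : PySem.Set.add seen k = seen ++ [k] := by
          simp only [PySem.Set.add, hc, Bool.false_eq_true, if_false]
        rw [hadd]
        apply ih
        intro x
        rw [haddseen]
        have h' : (x ∈ seen) ↔ (x ∈ acc) := by
          have hx := h x
          rw [Bool.eq_iff_iff] at hx
          simpa only [List.contains_iff_mem, PySem.Set.contains_iff] using hx
        simp [List.mem_append, h']

-- Membership test against set(xs) is the membership test against xs.
theorem pvContains_ofList (s : List String) (x : String) :
    PySem.Set.contains (PySem.Set.ofList s) x = PySem.Set.contains s x := by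
  simp [PySem.Set.mem_ofList]

-- The reverse-overwrite dict comprehension looks up the FIRST index of each key.
theorem pvGetD_first (flat : List String) (s : Int) (d : PySem.Dict String Int) (k : String) :
    PySem.Dict.getD
      ((PySem.List.enumerate flat s).reverse.foldl
        (fun d p => PySem.Dict.insert d p.2 p.1) d) k 0
    = if k ∈ flat then s + (flat.idxOf k : Int) else PySem.Dict.getD d k 0 := by
  induction flat generalizing s d with
  | nil => simp [PySem.List.enumerate]
  | cons x xs ih =>
      rw [PySem.List.enumerate_cons]
      simp only [List.reverse_cons, List.foldl_append, List.foldl_cons, List.foldl_nil]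
      by_cases hk : k = x
      · subst hk
        rw [PySem.Dict.getD_insert_self]
        simp [List.idxOf_cons_self]
      · rw [PySem.Dict.getD_insert_of_ne _ _ _ hk, ih]
        by_cases hm : k ∈ xs
        · rw [if_pos hm, if_pos (List.mem_cons_of_mem _ hm), List.idxOf_cons_ne _ (Ne.symm hk)]
          push_cast
          ring
        · rw [if_neg hm, if_neg (by simp [hk, hm])]

-- set(L) lists first occurrences: first indices in L strictly increase along it.
theorem pvPairwise_idxOf (L : List String) :
    (PySem.Set.ofList L).Pairwise (fun a b => L.idxOf a < L.idxOf b) := by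
  induction L with
  | nil => simp [PySem.Set.ofList]
  | cons x xs ih =>
      rw [PySem.Set.ofList_cons]
      constructor
      · intro b hb
        have hbx : b ≠ x := by
          simp only [PySem.Set.discard, List.mem_filter] at hb
          simpa using hb.2
        rw [List.idxOf_cons_self, List.idxOf_cons_ne _ (Ne.symm hbx)]
        exact Nat.succ_pos _
      · have hp : ((PySem.Set.ofList xs).discard x).Pairwise
            (fun a b => xs.idxOf a < xs.idxOf b) :=
          List.Pairwise.filter _ ih
        refine hp.imp_of_mem ?_
        intro a b ha hb hlt
        have hax : a ≠ x := by
          simp only [PySem.Set.discard, List.mem_filter] at ha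
          simpa using ha.2
        have hbx : b ≠ x := by
          simp only [PySem.Set.discard, List.mem_filter] at hb
          simpa using hb.2
        rw [List.idxOf_cons_ne _ (Ne.symm hax), List.idxOf_cons_ne _ (Ne.symm hbx)]
        exact Nat.succ_lt_succ hlt

-- ===== VERDICT (by name: the statement is the Claim_ definition above) =====

theorem union_fieldnames_py_spec : Claim_equal_union_fieldnames_py := by
  intro required_fields rows _
  unfold Spec_union_fieldnames_py union_fieldnames_py union_fieldnames_py_alt
  dsimp only
  rw [pvA_flatten, pvA_fold_eq_update _ _ _
    (by intro x; simp [PySem.Set.mem_ofList])]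
  rw [PySem.Set.update_eq_append_filter]
  congr 1
  refine (PySem.List.sorted_eq_of_perm_of_pairwise_lt _ _ _ ?_ ?_).symm
  · -- permutation: B's filtered key list rearranges A's filtered dedup
    have hkeys := PySem.Dict.keys_foldl_insert_key (ν := Int)
      ((PySem.List.enumerate (rows.flatMap fun row => row.map Prod.fst) 0).reverse)
      (fun p : Int × String => p.2) (fun _ p => p.1) PySem.Dict.empty
    rw [PySem.Dict.keys_empty, List.map_reverse,
      PySem.List.map_snd_enumerate] at hkeys
    have hkeys' : ((PySem.List.enumerate (rows.flatMap fun row => row.map Prod.fst) 0).reverse.foldl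
        (fun d p => PySem.Dict.insert d p.2 p.1) PySem.Dict.empty).keys
        = PySem.Set.ofList (rows.flatMap (fun row => row.map Prod.fst)).reverse := hkeys
    have hperm : (PySem.Set.ofList ((rows.flatMap fun row => row.map Prod.fst)).reverse).Perm
        (PySem.Set.ofList (rows.flatMap fun row => row.map Prod.fst)) := by
      rw [List.perm_ext_iff_of_nodup (PySem.Set.nodup_ofList _) (PySem.Set.nodup_ofList _)]
      intro a
      simp [PySem.Set.mem_ofList]
    rw [hkeys']
    have hpred : ∀ k, (!PySem.Set.contains (PySem.Set.ofList required_fields) k)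
        = (!PySem.Set.contains required_fields k) := by
      intro k; rw [pvContains_ofList]
    rw [List.filter_congr (fun k _ => hpred k)]
    exact (hperm.filter _).symm
  · -- strict increase of the first-occurrence key along A's dedup order
    have hpw := List.Pairwise.filter (fun y => !PySem.Set.contains required_fields y)
      (pvPairwise_idxOf (rows.flatMap fun row => row.map Prod.fst))
    refine hpw.imp_of_mem ?_
    intro a b ha hb hlt
    have ha' : a ∈ (rows.flatMap fun row => row.map Prod.fst) :=
      (PySem.Set.mem_ofList _ _).mp (List.mem_of_mem_filter ha)
    have hb' : b ∈ (rows.flatMap fun row => row.map Prod.fst) :=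
      (PySem.Set.mem_ofList _ _).mp (List.mem_of_mem_filter hb)
    rw [pvGetD_first, pvGetD_first, if_pos ha', if_pos hb']
    have hc : ((rows.flatMap fun row => row.map Prod.fst).idxOf a : Int)
        < ((rows.flatMap fun row => row.map Prod.fst).idxOf b : Int) := by
      exact_mod_cast hlt
    omega
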